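-- pv_equiv track=rewrite | github.com/daniel-reich/ubiquitous-fiesta | HzeTvQqnH2afZs6GY_24.py | generate_rug
-- ===== SOURCE A (Python) =====
-- def generate_rug(n, direction):
--   if direction == 'left':
--     l1 = [y for y in range(n)]
--     l2 = [y for y in range(1,1+n)][::-1]
--     return [l2[x:] + l1[:x] for x in range(n,0,-1)]
--   else:
--     l1 = [y for y in range(n)][::-1]
--     l2 = [y for y in range(1,1+n)]
--     return [l1[x:] + l2[:x] for x in range(n)]
-- ===== SOURCE B (Python) =====
-- def generate_rug(n, direction):
--     if direction == 'left':
--         return [[abs(i - j) for j in range(n)] for i in range(n)]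
--     else:
--         return [[abs(n - 1 - i - j) for j in range(n)] for i in range(n)]
-- ===== Notes on version B (the rewrite author's own statement) =====
-- stated objective: simpler
-- what changed: Each cell is computed directly by the closed form abs(i-j) (left) / abs(n-1-i-j) (otherwise), removing A's two helper lists and the slice-and-concatenate row construction.
import Mathlib
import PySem

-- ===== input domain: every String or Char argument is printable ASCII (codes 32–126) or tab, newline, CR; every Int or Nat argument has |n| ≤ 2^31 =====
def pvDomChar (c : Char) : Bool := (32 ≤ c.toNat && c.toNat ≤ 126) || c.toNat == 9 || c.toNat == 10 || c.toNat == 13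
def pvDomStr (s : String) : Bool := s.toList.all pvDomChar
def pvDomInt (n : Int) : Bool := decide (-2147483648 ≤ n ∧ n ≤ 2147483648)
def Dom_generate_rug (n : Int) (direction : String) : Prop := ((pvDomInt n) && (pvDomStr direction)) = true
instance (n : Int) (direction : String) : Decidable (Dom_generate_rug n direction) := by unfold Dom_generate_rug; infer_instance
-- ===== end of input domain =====

-- B computes each cell by the closed form |i-j| (left) / |n-1-i-j| (otherwise) instead of
-- A's slice-and-concatenate row construction; objective: simpler.

-- ===== PORT A =====
def generate_rug (n : Int) (direction : String) : List (List Int) :=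
  if direction == "left" then
    let l1 := PySem.List.pyRange 0 n 1
    let l2 := (PySem.List.slice? (PySem.List.pyRange 1 (1+n) 1) none none (-1)).getD []
    (PySem.List.pyRange n 0 (-1)).map (fun x =>
      PySem.List.slice l2 (some x) none ++ PySem.List.slice l1 none (some x))
  else
    let l1 := (PySem.List.slice? (PySem.List.pyRange 0 n 1) none none (-1)).getD []
    let l2 := PySem.List.pyRange 1 (1+n) 1
    (PySem.List.pyRange 0 n 1).map (fun x =>
      PySem.List.slice l1 (some x) none ++ PySem.List.slice l2 none (some x))

-- ===== PORT B =====
def generate_rug_alt (n : Int) (direction : String) : List (List Int) :=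
  if direction == "left" then
    (PySem.List.pyRange 0 n 1).map (fun i =>
      (PySem.List.pyRange 0 n 1).map (fun j => |i - j|))
  else
    (PySem.List.pyRange 0 n 1).map (fun i =>
      (PySem.List.pyRange 0 n 1).map (fun j => |n - 1 - i - j|))

-- ===== PRECONDITION & SPEC =====
def Spec_generate_rug (n : Int) (direction : String) (out : List (List Int)) : Prop := out = generate_rug_alt n direction
instance (n : Int) (direction : String) (out : List (List Int)) : Decidable (Spec_generate_rug n direction out) := by unfold Spec_generate_rug; infer_instance

-- ===== CLAIM (what is proved, stated in full; the proofs are below) =====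
def Claim_equal_generate_rug : Prop := ∀ (n : Int) (direction : String), Dom_generate_rug n direction → Spec_generate_rug n direction (generate_rug n direction)

-- ===== LEMMAS AND PROOFS =====

-- left branch: row for x = n - k equals the closed-form row [|k - j|]_j
theorem pv_row_left (n : Int) (k : Nat) (hm : k < n.toNat) :
    ((List.range n.toNat).map (fun (j : Nat) => n - (j : Int))).drop (n.toNat - k)
      ++ ((List.range n.toNat).map (fun (j : Nat) => (0 : Int) + (j : Int))).take (n.toNat - k)
    = (List.range n.toNat).map (fun (j : Nat) => |((0 : Int) + (k : Int)) - ((0 : Int) + (j : Int))|) := by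
  have hn : (n.toNat : Int) = n := by omega
  apply List.ext_getElem
  · simp only [List.length_append, List.length_drop, List.length_take, List.length_map,
      List.length_range]
    omega
  · intro j h1 h2
    simp only [List.length_map, List.length_range] at h2
    rw [List.getElem_map, List.getElem_range]
    by_cases hj : j < k
    · have hb : j < (((List.range n.toNat).map (fun (j : Nat) => n - (j : Int))).drop (n.toNat - k)).length := by
        simp only [List.length_drop, List.length_map, List.length_range]; omega
      rw [List.getElem_append_left hb, List.getElem_drop, List.getElem_map, List.getElem_range]
      rw [abs_of_nonneg (by omega)]
      omega
    · have hb : ¬ j < (((List.range n.toNat).map (fun (j : Nat) => n - (j : Int))).drop (n.toNat - k)).length := by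
        simp only [List.length_drop, List.length_map, List.length_range]; omega
      rw [List.getElem_append_right (by omega), List.getElem_take, List.getElem_map,
        List.getElem_range]
      rw [abs_of_nonpos (by omega)]
      simp only [List.length_drop, List.length_map, List.length_range]
      omega

-- right branch: row for x = k equals the closed-form row [|n - 1 - k - j|]_j
theorem pv_row_right (n : Int) (k : Nat) (hm : k < n.toNat) :
    ((List.range n.toNat).map (fun (j : Nat) => n - 1 - (j : Int))).drop k
      ++ ((List.range n.toNat).map (fun (j : Nat) => (1 : Int) + (j : Int))).take k
    = (List.range n.toNat).map (fun (j : Nat) => |n - 1 - ((0 : Int) + (k : Int)) - ((0 : Int) + (j : Int))|) := by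
  have hn : (n.toNat : Int) = n := by omega
  apply List.ext_getElem
  · simp only [List.length_append, List.length_drop, List.length_take, List.length_map,
      List.length_range]
    omega
  · intro j h1 h2
    simp only [List.length_map, List.length_range] at h2
    rw [List.getElem_map, List.getElem_range]
    by_cases hj : j < n.toNat - k
    · have hb : j < (((List.range n.toNat).map (fun (j : Nat) => n - 1 - (j : Int))).drop k).length := by
        simp only [List.length_drop, List.length_map, List.length_range]; omega
      rw [List.getElem_append_left hb, List.getElem_drop, List.getElem_map, List.getElem_range]
      rw [abs_of_nonneg (by omega)]
      omega
    · have hb : ¬ j < (((List.range n.toNat).map (fun (j : Nat) => n - 1 - (j : Int))).drop k).length := by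
        simp only [List.length_drop, List.length_map, List.length_range]; omega
      rw [List.getElem_append_right (by omega), List.getElem_take, List.getElem_map,
        List.getElem_range]
      rw [abs_of_nonpos (by omega)]
      simp only [List.length_drop, List.length_map, List.length_range]
      omega

-- ===== VERDICT (by name: the statement is the Claim_ definition above) =====
theorem generate_rug_spec : Claim_equal_generate_rug := by
  intro n direction _
  unfold Spec_generate_rug generate_rug generate_rug_alt
  by_cases hd : direction == "left" <;> simp only [hd, Bool.false_eq_true, ite_true, ite_false]
  · -- left branch
    rw [PySem.List.slice?_none_none_neg_one]
    simp only [Option.getD_some]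
    have h2 : (PySem.List.pyRange 1 (1+n) 1).reverse = PySem.List.pyRange n 0 (-1) := by
      rw [show (1:Int) + n = n + 1 by ring]
      exact (PySem.List.pyRange_neg_one_eq_reverse n 0).symm
    rw [h2]
    rw [PySem.List.pyRange_neg_one, PySem.List.pyRange_one]
    simp only [List.map_map, show n - (0:Int) = n from by ring]
    apply List.map_congr_left
    intro k hk
    simp only [List.mem_range] at hk
    simp only [Function.comp_apply]
    have h0 : (0:Int) ≤ n - (k:Int) := by omega
    rw [PySem.List.slice_from _ h0, PySem.List.slice_to _ h0]
    have ht : (n - (k:Int)).toNat = n.toNat - k := by omega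
    rw [ht]
    exact pv_row_left n k hk
  · -- right branch
    rw [PySem.List.slice?_none_none_neg_one]
    simp only [Option.getD_some]
    have h1 : (PySem.List.pyRange 0 n 1).reverse = PySem.List.pyRange (n-1) (-1) (-1) := by
      rw [PySem.List.pyRange_neg_one_eq_reverse (n-1) (-1)]
      norm_num
    rw [h1]
    rw [PySem.List.pyRange_neg_one, PySem.List.pyRange_one, PySem.List.pyRange_one]
    simp only [List.map_map, show n - 1 - (-1 : Int) = n from by ring,
      show n - (0:Int) = n from by ring, show (1 + n) - (1:Int) = n from by ring]
    apply List.map_congr_left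
    intro k hk
    simp only [List.mem_range] at hk
    simp only [Function.comp_apply]
    have h0 : (0:Int) ≤ (0:Int) + (k:Int) := by omega
    rw [PySem.List.slice_from _ h0, PySem.List.slice_to _ h0]
    have ht : ((0:Int) + (k:Int)).toNat = k := by omega
    rw [ht]
    exact pv_row_right n k hk
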